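-- pv_equiv track=rewrite | github.com/Yawn-Sean/Daily_CF_Problems | daily_problems/2024/08/0831/personal_submission/cf847b_liryc.py | solve
-- ===== SOURCE A (Python) =====
-- from bisect import bisect_left
--
-- def solve(n: int, a: list[int]):
--     sa = []
--     for x in a:
--         i = bisect_left(sa, 1, key = lambda l: l[-1] <= x)
--         if i >= len(sa):
--             sa.append([x])
--         else:
--             sa[i].append(x)
--     return '\n'.join(' '.join(map(str, l)) for l in sa)
-- ===== SOURCE B (Python) =====
-- def solve(n: int, a: list[int]):
--     piles = []
--     for x in a:
--         for p in piles:
--             if p[-1] <= x: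
--                 p.append(x)
--                 break
--         else:
--             piles.append([x])
--     return '\n'.join(' '.join(map(str, p)) for p in piles)
-- ===== Notes on version B (the rewrite author's own statement) =====
-- stated objective: simpler
-- what changed: Replaces the bisect_left binary search with a boolean key (which relies on the pile tails being strictly decreasing) by a plain left-to-right scan that appends x to the first pile whose last element is <= x.
import Mathlib
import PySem

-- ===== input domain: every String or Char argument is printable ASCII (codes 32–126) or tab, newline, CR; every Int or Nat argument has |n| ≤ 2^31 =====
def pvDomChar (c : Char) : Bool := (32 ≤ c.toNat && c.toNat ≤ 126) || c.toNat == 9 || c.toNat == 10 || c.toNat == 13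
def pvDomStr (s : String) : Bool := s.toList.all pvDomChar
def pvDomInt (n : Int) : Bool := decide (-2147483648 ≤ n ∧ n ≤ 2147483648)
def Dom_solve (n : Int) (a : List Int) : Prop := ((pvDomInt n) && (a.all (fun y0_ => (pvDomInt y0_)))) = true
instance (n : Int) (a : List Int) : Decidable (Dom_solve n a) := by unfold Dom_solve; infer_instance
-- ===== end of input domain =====

-- B replaces A's bisect_left-with-boolean-key binary search by a plain left-to-right
-- scan appending x to the first pile whose last element is <= x (simpler, no speed claim).


-- ===== PORT A =====
-- l[-1]: every pile in sa is nonempty, so pyGet? never yields none; getD 0 is the option peel.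
def pvTail (l : List Int) : Int := (PySem.List.pyGet? l (-1)).getD 0

-- bisect_left(sa, 1, key = lambda l: l[-1] <= x): value 1, key(l) is a bool compared as 0/1,
-- so 'key(a[mid]) < 1' is '¬ (a[mid][-1] <= x)'.
def pvBisect (sa : List (List Int)) (x : Int) (lo hi : Nat) : Nat :=
  if lo < hi then
    let mid := (lo + hi) / 2
    if ¬ (pvTail (sa.getD mid []) ≤ x) then pvBisect sa x (mid + 1) hi
    else pvBisect sa x lo mid
  else lo
termination_by hi - lo
decreasing_by all_goals omega

-- sa[i].append(x) as a functional update
def pvStepA (sa : List (List Int)) (x : Int) : List (List Int) :=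
  let i := pvBisect sa x 0 sa.length
  if i ≥ sa.length then sa ++ [[x]] else sa.set i (sa.getD i [] ++ [x])

def pvFmt (sa : List (List Int)) : String :=
  PySem.Str.join "\n" (sa.map (fun l => PySem.Str.join " " (l.map PySem.Int.toStr)))

def solve (n : Int) (a : List Int) : String :=
  pvFmt (a.foldl pvStepA [])

-- ===== PORT B =====
-- for p in piles: append x to the first pile with p[-1] <= x, else start a new pile
def pvInsert (x : Int) : List (List Int) → List (List Int)
  | [] => [[x]]
  | p :: rest => if pvTail p ≤ x then (p ++ [x]) :: rest else p :: pvInsert x rest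

def solve_alt (n : Int) (a : List Int) : String :=
  pvFmt (a.foldl (fun piles x => pvInsert x piles) [])

-- ===== PRECONDITION & SPEC =====
def Spec_solve (n : Int) (a : List Int) (out : String) : Prop := out = solve_alt n a
instance (n : Int) (a : List Int) (out : String) : Decidable (Spec_solve n a out) := by unfold Spec_solve; infer_instance

-- ===== CLAIM (what is proved, stated in full; the proofs are below) =====
def Claim_equal_solve : Prop := ∀ (n : Int) (a : List Int), Dom_solve n a → Spec_solve n a (solve n a)

-- ===== LEMMAS AND PROOFS =====

-- every pile of pvInsert x rest is a pile of rest, a pile of rest with x appended, or [x]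
theorem mem_pvInsert (x : Int) (q : List Int) :
    ∀ rest, q ∈ pvInsert x rest → (∃ r ∈ rest, q = r ∨ q = r ++ [x]) ∨ q = [x] := by
  intro rest
  induction rest with
  | nil => intro hq; simp [pvInsert] at hq; exact Or.inr hq
  | cons r rs ihr =>
    intro hq
    by_cases hr : pvTail r ≤ x
    · rw [pvInsert, if_pos hr] at hq
      rcases List.mem_cons.mp hq with hq | hq
      · exact Or.inl ⟨r, by simp, Or.inr hq⟩
      · exact Or.inl ⟨q, by simp [hq], Or.inl rfl⟩
    · rw [pvInsert, if_neg hr] at hq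
      rcases List.mem_cons.mp hq with hq | hq
      · exact Or.inl ⟨r, by simp, Or.inl hq⟩
      · rcases ihr hq with ⟨r', hr', hor⟩ | h
        · exact Or.inl ⟨r', by simp [hr'], hor⟩
        · exact Or.inr h

-- invariant: tails of the piles are strictly decreasing (this is what makes A's binary search correct)
def pvInv (sa : List (List Int)) : Prop :=
  sa.Pairwise (fun p q => pvTail q < pvTail p)

theorem pvTail_append (l : List Int) (x : Int) : pvTail (l ++ [x]) = x := by
  simp [pvTail, PySem.List.pyGet?_neg_one, List.getLast?_append]

-- the scan result, characterised by the first-match index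
theorem pvInsert_eq_findIdx (x : Int) (sa : List (List Int)) :
    pvInsert x sa =
      (if h : sa.findIdx (fun p => pvTail p ≤ x) < sa.length
       then sa.set (sa.findIdx (fun p => pvTail p ≤ x))
              (sa.getD (sa.findIdx (fun p => pvTail p ≤ x)) [] ++ [x])
       else sa ++ [[x]]) := by
  induction sa with
  | nil => simp [pvInsert]
  | cons p rest ih =>
    by_cases hp : pvTail p ≤ x
    · simp [pvInsert, hp, List.findIdx_cons]
    · have h1 : (p :: rest).findIdx (fun p => pvTail p ≤ x)
          = (rest.findIdx (fun p => pvTail p ≤ x)) + 1 := by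
        simp [List.findIdx_cons, hp]
      rw [pvInsert, if_neg hp, ih, h1]
      by_cases h2 : rest.findIdx (fun p => pvTail p ≤ x) < rest.length
      · rw [dif_pos h2, dif_pos (by simpa using Nat.succ_lt_succ h2)]
        simp [List.set_cons_succ, List.getD]
      · rw [dif_neg h2, dif_neg (by simp only [List.length_cons]; omega)]
        simp

-- binary-search correctness on a 0/1-monotone predicate
theorem pvBisect_eq (sa : List (List Int)) (x : Int) (j : Nat)
    (hlow : ∀ i, i < j → ¬ pvTail (sa.getD i []) ≤ x)
    (hhigh : ∀ i, j ≤ i → i < sa.length → pvTail (sa.getD i []) ≤ x) :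
    ∀ lo hi, lo ≤ j → j ≤ hi → hi ≤ sa.length → pvBisect sa x lo hi = j := by
  intro lo hi
  induction hn : hi - lo using Nat.strong_induction_on generalizing lo hi with
  | _ n ih =>
    intro h1 h2 h3
    rw [pvBisect]
    by_cases hlt : lo < hi
    · rw [if_pos hlt]
      set mid := (lo + hi) / 2 with hmid
      have hm1 : lo ≤ mid := by omega
      have hm2 : mid < hi := by omega
      by_cases hk : pvTail (sa.getD mid []) ≤ x
      · -- mid ≥ j would be needed for hk... hk true ⇒ mid ≥ j (else hlow contradicts)
        rw [if_neg (by simpa using hk)]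
        have hjm : j ≤ mid := by
          by_contra hc
          exact hlow mid (by omega) hk
        exact ih (mid - lo) (by omega) lo mid rfl h1 hjm (by omega)
      · rw [if_pos (by simpa using hk)]
        have hjm : mid < j := by
          by_contra hc
          exact hk (hhigh mid (by omega) (by omega))
        exact ih (hi - (mid + 1)) (by omega) (mid + 1) hi rfl (by omega) h2 h3
    · rw [if_neg hlt]; omega

theorem pvStepA_eq_pvInsert (sa : List (List Int)) (x : Int) (hinv : pvInv sa) :
    pvStepA sa x = pvInsert x sa := by
  set j := sa.findIdx (fun p => pvTail p ≤ x) with hj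
  have hjlen : j ≤ sa.length := List.findIdx_le_length
  have hlow : ∀ i, i < j → ¬ pvTail (sa.getD i []) ≤ x := by
    intro i hi
    have hilen : i < sa.length := by
      have := List.findIdx_le_length (p := fun p => pvTail p ≤ x) (xs := sa); omega
    have := List.not_of_lt_findIdx (p := fun p => pvTail p ≤ x) (xs := sa) (by omega : i < j)
    simpa [List.getD_eq_getElem?_getD, List.getElem?_eq_getElem hilen] using this
  have hhigh : ∀ i, j ≤ i → i < sa.length → pvTail (sa.getD i []) ≤ x := by
    intro i hji hilen
    have hjlt : j < sa.length := by omega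
    have hpj : pvTail sa[j] ≤ x := by
      have := List.findIdx_getElem (p := fun p => pvTail p ≤ x) (xs := sa) (w := hjlt)
      simpa using this
    have hle : pvTail sa[i] ≤ pvTail sa[j] := by
      rcases Nat.eq_or_lt_of_le hji with h | h
      · subst h; exact le_refl _
      · have := List.pairwise_iff_getElem.mp hinv j i hjlt hilen h
        exact le_of_lt this
    have : pvTail sa[i] ≤ x := le_trans hle hpj
    simpa [List.getD_eq_getElem?_getD, List.getElem?_eq_getElem hilen] using this
  have hb : pvBisect sa x 0 sa.length = j :=
    pvBisect_eq sa x j hlow hhigh 0 sa.length (Nat.zero_le _) hjlen (le_refl _)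
  rw [pvStepA, pvInsert_eq_findIdx]
  simp only [hb, ← hj]
  by_cases h : j < sa.length
  · rw [dif_pos h, if_neg (by omega)]
  · rw [dif_neg h, if_pos (by omega)]

theorem pvInv_insert (sa : List (List Int)) (x : Int) (hinv : pvInv sa) :
    pvInv (pvInsert x sa) := by
  induction sa with
  | nil => simp [pvInsert, pvInv]
  | cons p rest ih =>
    rcases List.pairwise_cons.mp hinv with ⟨hp, hrest⟩
    by_cases hx : pvTail p ≤ x
    · rw [pvInsert, if_pos hx]
      refine List.pairwise_cons.mpr ⟨?_, hrest⟩
      intro q hq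
      have := hp q hq
      rw [pvTail_append]
      omega
    · rw [pvInsert, if_neg hx]
      refine List.pairwise_cons.mpr ⟨?_, ih hrest⟩
      intro q hq
      -- every pile of pvInsert x rest is a pile of rest, a pile of rest with x appended, or [x]
      have hmem := mem_pvInsert x q rest hq
      rcases hmem with ⟨r, hr, hor⟩ | hq1
      · rcases hor with h | h
        · rw [h]; exact hp r hr
        · subst h; rw [pvTail_append]; omega
      · subst hq1
        have : pvTail [x] = x := by simp [pvTail, PySem.List.pyGet?_neg_one]
        rw [this]; omega

theorem foldl_eq (a : List Int) :
    ∀ sa, pvInv sa → a.foldl pvStepA sa = a.foldl (fun piles x => pvInsert x piles) sa := by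
  induction a with
  | nil => intro sa _; rfl
  | cons x rest ih =>
    intro sa hinv
    simp only [List.foldl_cons]
    rw [pvStepA_eq_pvInsert sa x hinv]
    exact ih _ (pvInv_insert sa x hinv)

-- ===== VERDICT (by name: the statement is the Claim_ definition above) =====
theorem solve_spec : Claim_equal_solve := by
  intro n a _
  unfold Spec_solve solve solve_alt
  rw [foldl_eq a [] (by simp [pvInv])]
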